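-- pv_equiv track=rewrite | github.com/rjshearme/project_euler_plus | euler_025/python_025.py | gen_fibs
-- ===== SOURCE A (Python) =====
-- def gen_fibs(limit):
--     fibs = [1, 1]
--     max_len_seen = 1
--     fib_len_dict = {
--         1: 1
--     }
--     fib_term = 2
--     len_last_fib = 1
--     while len_last_fib < limit:
--         fibs.append(fibs[-2] + fibs[-1])
--         fib_term += 1
--         len_last_fib =  len(str(fibs[-1]))
--         if len_last_fib > max_len_seen:
--             fib_len_dict[len_last_fib] = fib_term
--             max_len_seen = len_last_fib
--     return fib_len_dict
-- ===== SOURCE B (Python) =====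
-- def gen_fibs(limit):
--     # Phase 1: generate the Fibonacci list up to the first term with >= limit digits.
--     fibs = [1, 1]
--     while len(str(fibs[-1])) < limit:
--         fibs.append(fibs[-2] + fibs[-1])
--     # Phase 2: for each digit length, binary-search the (monotone) list for the
--     # first term of that length; term number = index + 1.
--     fib_len_dict = {}
--     for target_len in range(1, max(limit, 1) + 1):
--         lo, hi = 0, len(fibs) - 1
--         while lo < hi:
--             mid = (lo + hi) // 2
--             if len(str(fibs[mid])) < target_len:
--                 lo = mid + 1
--             else:
--                 hi = mid
--         fib_len_dict[target_len] = lo + 1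
--     return fib_len_dict
-- ===== Notes on version B (the rewrite author's own statement) =====
-- stated objective: alternative
-- what changed: B replaces A's single fused loop (generate each Fibonacci number while tracking a running maximum digit length and recording new maxima on the fly) with two separate phases: it first materialises the Fibonacci list up to the first term with limit digits, then finds the first term of each digit length 1..limit by binary search over that monotone list instead of any per-element tracking.
import Mathlib
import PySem

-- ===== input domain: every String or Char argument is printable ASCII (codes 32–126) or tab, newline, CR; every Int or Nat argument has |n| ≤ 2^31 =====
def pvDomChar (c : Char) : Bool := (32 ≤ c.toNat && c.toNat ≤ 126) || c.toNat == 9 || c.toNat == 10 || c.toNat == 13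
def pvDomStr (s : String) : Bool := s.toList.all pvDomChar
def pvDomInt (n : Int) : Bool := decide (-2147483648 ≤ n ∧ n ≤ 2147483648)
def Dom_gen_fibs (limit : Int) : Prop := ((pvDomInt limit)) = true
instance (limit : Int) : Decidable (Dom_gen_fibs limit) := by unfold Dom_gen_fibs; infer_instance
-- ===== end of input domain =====

-- B splits A's fused generate-and-track loop into two phases: it first generates the Fibonacci
-- list up to the first term with >= limit digits, then finds the first term of each digit length
-- by binary search over that (monotone) list (objective: alternative, same asymptotic cost).

-- ===== PORT A =====
-- Helper used only by the ports' termination proofs: the decimal digit count of a natural number.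
def gfDigits (n : Nat) : Nat :=
  if n < 10 then 1 else gfDigits (n / 10) + 1
termination_by n
decreasing_by exact Nat.div_lt_self (by omega) (by omega)

lemma gfDigits_pos (n : Nat) : 1 ≤ gfDigits n := by
  rw [gfDigits]; split <;> omega

lemma gfDigits_core_length : ∀ (f n : Nat) (l : List Char), n < f →
    (Nat.toDigitsCore 10 f n l).length = gfDigits n + l.length := by
  intro f
  induction f with
  | zero => intro n l h; omega
  | succ f ih =>
    intro n l h
    simp only [Nat.toDigitsCore]
    by_cases h10 : n / 10 = 0
    · rw [if_pos h10, gfDigits, if_pos (by omega : n < 10)]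
      simp only [List.length_cons]
      omega
    · rw [if_neg h10]
      have hn0 : 0 < n := by omega
      have hlt : n / 10 < f := by
        have := Nat.div_lt_self hn0 (by omega : 1 < 10)
        omega
      have hgn : gfDigits n = gfDigits (n / 10) + 1 := by
        rw [gfDigits, if_neg (by omega : ¬ n < 10)]
      rw [ih (n / 10) _ hlt, hgn]
      simp only [List.length_cons]
      omega

lemma gfDigits_char (n : Nat) (h1 : 1 ≤ n) :
    10 ^ (gfDigits n - 1) ≤ n ∧ n < 10 ^ gfDigits n := by
  induction n using Nat.strong_induction_on with
  | _ n ih =>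
    rw [gfDigits]
    by_cases h : n < 10
    · rw [if_pos h]; constructor
      · simpa using h1
      · simpa using h
    · rw [if_neg h]
      have hq1 : 1 ≤ n / 10 := by omega
      have hlt : n / 10 < n := by omega
      obtain ⟨hlo, hhi⟩ := ih (n / 10) hlt hq1
      have hg := gfDigits_pos (n / 10)
      have hps : 10 ^ gfDigits (n / 10) = 10 ^ (gfDigits (n / 10) - 1) * 10 := by
        rw [← pow_succ]
        congr 1
        omega
      constructor
      · simp only [Nat.add_sub_cancel]
        rw [hps]
        omega
      · rw [pow_succ]
        omega

lemma toChars_length (n : Int) (h : 0 < n) :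
    (PySem.Int.toChars n).length = gfDigits n.toNat := by
  rw [PySem.Int.toChars, if_neg (by omega : ¬ n < 0), Nat.toDigits,
    gfDigits_core_length _ _ _ (by omega)]
  simp

lemma strLen_toStr (n : Int) (h : 0 < n) :
    PySem.Str.len (PySem.Int.toStr n) = (gfDigits n.toNat : Int) := by
  rw [PySem.Str.len_eq, PySem.Int.toList_toStr, toChars_length n h]

lemma gf_measure_lt (limit a b : Int) (ha : 0 < a) (hab : a ≤ b)
    (hlt : PySem.Str.len (PySem.Int.toStr b) < limit) :
    10 ^ limit.toNat - (a + b).toNat < 10 ^ limit.toNat - b.toNat := by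
  have hb : 0 < b := lt_of_lt_of_le ha hab
  rw [strLen_toStr b hb] at hlt
  have hg := gfDigits_pos b.toNat
  have hchar := (gfDigits_char b.toNat (by omega)).2
  have hpow : 10 ^ gfDigits b.toNat ≤ 10 ^ limit.toNat :=
    Nat.pow_le_pow_right (by norm_num) (by omega)
  omega

-- Port of A. The Python list `fibs` always ends with its last two elements: they are carried
-- alongside as `a`, `b` (so `fibs[-2] + fibs[-1]` is `a + b`); `fibs` itself is still built
-- exactly as in Python. The `inv` argument carries the facts needed for termination.
def gen_fibs_loop (limit : Int) (fibs : List Int) (a b max_len_seen : Int)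
    (fib_len_dict : PySem.Dict Int Int) (fib_term len_last_fib : Int)
    (inv : 0 < a ∧ a ≤ b ∧ len_last_fib = PySem.Str.len (PySem.Int.toStr b)) :
    PySem.Dict Int Int :=
  if h : len_last_fib < limit then
    if PySem.Str.len (PySem.Int.toStr (a + b)) > max_len_seen then
      gen_fibs_loop limit (fibs ++ [a + b]) b (a + b)
        (PySem.Str.len (PySem.Int.toStr (a + b)))
        (fib_len_dict.insert (PySem.Str.len (PySem.Int.toStr (a + b))) (fib_term + 1))
        (fib_term + 1) (PySem.Str.len (PySem.Int.toStr (a + b)))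
        ⟨by omega, by omega, rfl⟩
    else
      gen_fibs_loop limit (fibs ++ [a + b]) b (a + b) max_len_seen fib_len_dict
        (fib_term + 1) (PySem.Str.len (PySem.Int.toStr (a + b)))
        ⟨by omega, by omega, rfl⟩
  else fib_len_dict
termination_by (10 ^ limit.toNat - b.toNat)
decreasing_by
  · exact gf_measure_lt limit a b inv.1 inv.2.1 (inv.2.2 ▸ h)
  · exact gf_measure_lt limit a b inv.1 inv.2.1 (inv.2.2 ▸ h)

def gen_fibs (limit : Int) : List (Int × Int) :=
  (gen_fibs_loop limit [1, 1] 1 1 1 (PySem.Dict.ofList [(1, 1)]) 2 1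
    ⟨by norm_num, by norm_num, by decide⟩).items

-- ===== PORT B =====
-- Phase 1 of B: `while len(str(fibs[-1])) < limit: fibs.append(fibs[-2] + fibs[-1])`.
-- As in A's port, the last two elements are carried alongside as `a`, `b`; `inv` is for termination.
def gen_fibs_alt_gen (limit : Int) (fibs : List Int) (a b : Int)
    (inv : 0 < a ∧ a ≤ b) : List Int :=
  if h : PySem.Str.len (PySem.Int.toStr b) < limit then
    gen_fibs_alt_gen limit (fibs ++ [a + b]) b (a + b) ⟨by omega, by omega⟩
  else fibs
termination_by (10 ^ limit.toNat - b.toNat)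
decreasing_by exact gf_measure_lt limit a b inv.1 inv.2 h

-- Phase 2 of B: the hand-written binary search (`while lo < hi: …`). The indexing
-- `fibs[mid]` always has 0 <= mid < len(fibs) at every call site, so the default of
-- pyGetD is never read.
def gen_fibs_alt_bsearch (fibs : List Int) (target_len lo hi : Int) : Int :=
  if h : lo < hi then
    let mid := PySem.Int.floordiv (lo + hi) 2
    if PySem.Str.len (PySem.Int.toStr (PySem.List.pyGetD fibs mid 0)) < target_len then
      gen_fibs_alt_bsearch fibs target_len (mid + 1) hi
    else
      gen_fibs_alt_bsearch fibs target_len lo mid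
  else lo
termination_by (hi - lo).toNat
decreasing_by
  · have h1 : lo ≤ PySem.Int.floordiv (lo + hi) 2 :=
      (PySem.Int.le_floordiv_iff_mul_le (by omega)).mpr (by omega)
    omega
  · have h2 : PySem.Int.floordiv (lo + hi) 2 < hi :=
      (PySem.Int.floordiv_lt_iff_lt_mul (by omega)).mpr (by omega)
    omega

def gen_fibs_alt (limit : Int) : List (Int × Int) :=
  let fibs := gen_fibs_alt_gen limit [1, 1] 1 1 ⟨by norm_num, by norm_num⟩
  ((PySem.List.pyRange 1 (max limit 1 + 1) 1).foldl
    (fun d target_len =>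
      d.insert target_len
        (gen_fibs_alt_bsearch fibs target_len 0 (PySem.List.len fibs - 1) + 1))
    PySem.Dict.empty).items

-- ===== PRECONDITION & SPEC =====
def Spec_gen_fibs (limit : Int) (out : List (Int × Int)) : Prop := out = gen_fibs_alt limit
instance (limit : Int) (out : List (Int × Int)) : Decidable (Spec_gen_fibs limit out) := by unfold Spec_gen_fibs; infer_instance

-- ===== CLAIM (what is proved, stated in full; the proofs are below) =====
def Claim_equal_gen_fibs : Prop := ∀ (limit : Int), Dom_gen_fibs limit → Spec_gen_fibs limit (gen_fibs limit)

-- ===== LEMMAS AND PROOFS =====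

lemma gfDigits_unique (n d : Nat) (hd : 1 ≤ d)
    (hlo : 10 ^ (d - 1) ≤ n) (hhi : n < 10 ^ d) : gfDigits n = d := by
  have h1 : 1 ≤ n := le_trans (Nat.one_le_pow _ _ (by norm_num)) hlo
  obtain ⟨glo, ghi⟩ := gfDigits_char n h1
  have hg := gfDigits_pos n
  by_contra hne
  rcases Nat.lt_or_ge (gfDigits n) d with hc | hc
  · have : 10 ^ gfDigits n ≤ 10 ^ (d - 1) := Nat.pow_le_pow_right (by norm_num) (by omega)
    omega
  · have : 10 ^ d ≤ 10 ^ (gfDigits n - 1) := Nat.pow_le_pow_right (by norm_num) (by omega)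
    omega

lemma gfDigits_mono (m n : Nat) (hm : 1 ≤ m) (hmn : m ≤ n) : gfDigits m ≤ gfDigits n := by
  by_contra h
  obtain ⟨hlo, _⟩ := gfDigits_char m hm
  obtain ⟨_, hhi⟩ := gfDigits_char n (by omega)
  have : 10 ^ gfDigits n ≤ 10 ^ (gfDigits m - 1) :=
    Nat.pow_le_pow_right (by norm_num) (by omega)
  omega

lemma strLen_mono (x y : Int) (hx : 0 < x) (hxy : x ≤ y) :
    PySem.Str.len (PySem.Int.toStr x) ≤ PySem.Str.len (PySem.Int.toStr y) := by
  rw [strLen_toStr x hx, strLen_toStr y (by omega)]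
  exact_mod_cast gfDigits_mono x.toNat y.toNat (by omega) (by omega)

-- One Fibonacci step grows the digit count by 0 or 1, according to the power-of-ten threshold.
lemma step_digits (a b : Nat) (ha : 0 < a) (hab : a ≤ b) :
    (a + b < 10 ^ gfDigits b ∧ gfDigits (a + b) = gfDigits b) ∨
    (10 ^ gfDigits b ≤ a + b ∧ gfDigits (a + b) = gfDigits b + 1) := by
  have hchar := gfDigits_char b (by omega)
  have hg := gfDigits_pos b
  by_cases hc : a + b < 10 ^ gfDigits b
  · exact Or.inl ⟨hc, gfDigits_unique _ _ hg (le_trans hchar.1 (by omega)) hc⟩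
  · refine Or.inr ⟨by omega, gfDigits_unique _ _ (by omega) ?_ ?_⟩
    · simpa using (by omega : 10 ^ gfDigits b ≤ a + b)
    · have h1 : 1 ≤ 10 ^ gfDigits b := Nat.one_le_pow _ _ (by norm_num)
      have h2 := hchar.2
      rw [pow_succ]
      omega

-- Int-level form of step_digits for the two states a ≤ b, 0 < a.
lemma step_digits_int (a b : Int) (ha : 0 < a) (hab : a ≤ b) :
    PySem.Str.len (PySem.Int.toStr (a + b)) = PySem.Str.len (PySem.Int.toStr b) ∨
    PySem.Str.len (PySem.Int.toStr (a + b)) = PySem.Str.len (PySem.Int.toStr b) + 1 := by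
  have hb : 0 < b := by omega
  rw [strLen_toStr b hb, strLen_toStr (a + b) (by omega)]
  have habN : (a + b).toNat = a.toNat + b.toNat := by omega
  rcases step_digits a.toNat b.toNat (by omega) (by omega) with ⟨_, h⟩ | ⟨_, h⟩
  · left; rw [habN, h]
  · right; rw [habN, h]; push_cast; ring

lemma findIdx_first (l : List Int) (p : Int → Bool) (i : Nat) (h : i < l.length)
    (hp : p (l.getD i 0)) (hb : ∀ j, j < i → ¬ p (l.getD j 0)) : l.findIdx p = i := by
  rw [List.findIdx_eq h]
  refine ⟨by rwa [List.getD_eq_getElem l 0 h] at hp, fun j hj => ?_⟩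
  have := hb j hj
  rw [List.getD_eq_getElem l 0 (by omega)] at this
  simpa using this

-- Characterisation of B's generation phase: it extends `fibs`, keeps every element positive
-- and the list sorted, the last element only grows, and the digit count of the final last
-- element is max limit (digits of the current last element b).
lemma gen_char (limit : Int) : ∀ (n : Nat) (fibs : List Int) (a b : Int)
    (inv : 0 < a ∧ a ≤ b)
    (hn : 10 ^ limit.toNat - b.toNat ≤ n)
    (hmem : ∀ x ∈ fibs, 0 < x ∧ x ≤ b)
    (hlast : fibs.getLast? = some b)
    (hpw : fibs.Pairwise (· ≤ ·)),
    (∃ ext, gen_fibs_alt_gen limit fibs a b inv = fibs ++ ext) ∧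
    (∀ x ∈ gen_fibs_alt_gen limit fibs a b inv, 0 < x) ∧
    (gen_fibs_alt_gen limit fibs a b inv).Pairwise (· ≤ ·) ∧
    b ≤ (gen_fibs_alt_gen limit fibs a b inv).getLastD 0 ∧
    PySem.Str.len (PySem.Int.toStr ((gen_fibs_alt_gen limit fibs a b inv).getLastD 0))
      = max limit (PySem.Str.len (PySem.Int.toStr b)) := by
  intro n
  induction n with
  | zero =>
    intro fibs a b inv hn hmem hlast hpw
    obtain ⟨ha, hab⟩ := inv
    have hb : 0 < b := by omega
    have hc : ¬ PySem.Str.len (PySem.Int.toStr b) < limit := by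
      intro hlt
      rw [strLen_toStr b hb] at hlt
      have hg := gfDigits_pos b.toNat
      have hchar := (gfDigits_char b.toNat (by omega)).2
      have hpow : 10 ^ gfDigits b.toNat ≤ 10 ^ limit.toNat :=
        Nat.pow_le_pow_right (by norm_num) (by omega)
      omega
    rw [gen_fibs_alt_gen, dif_neg hc]
    have hlastD : fibs.getLastD 0 = b := by
      rw [List.getLastD_eq_getLast?, hlast]; rfl
    exact ⟨⟨[], by simp⟩, fun x hx => (hmem x hx).1, hpw,
      by rw [hlastD], by rw [hlastD]; omega⟩
  | succ n ih =>
    intro fibs a b inv hn hmem hlast hpw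
    obtain ⟨ha, hab⟩ := inv
    have hb : 0 < b := by omega
    by_cases hc : PySem.Str.len (PySem.Int.toStr b) < limit
    · rw [gen_fibs_alt_gen, dif_pos hc]
      have hmem' : ∀ x ∈ fibs ++ [a + b], 0 < x ∧ x ≤ a + b := by
        intro x hx
        rcases List.mem_append.mp hx with hx | hx
        · have := hmem x hx; constructor <;> omega
        · simp at hx; omega
      have hlast' : (fibs ++ [a + b]).getLast? = some (a + b) := by
        simp
      have hpw' : (fibs ++ [a + b]).Pairwise (· ≤ ·) := by
        refine List.pairwise_append.mpr ⟨hpw, List.pairwise_singleton _ _, ?_⟩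
        intro x hx y hy
        simp at hy
        have := hmem x hx
        omega
      have hn' : 10 ^ limit.toNat - (a + b).toNat ≤ n := by
        have := gf_measure_lt limit a b ha hab hc
        omega
      obtain ⟨⟨ext, hext⟩, hpos, hpw2, hle, hlen⟩ :=
        ih (fibs ++ [a + b]) b (a + b) ⟨by omega, by omega⟩ hn' hmem' hlast' hpw'
      refine ⟨⟨[a + b] ++ ext, by rw [hext, List.append_assoc]⟩, hpos, hpw2,
        by omega, ?_⟩
      rw [hlen]
      rcases step_digits_int a b ha hab with h | h <;> rw [h] <;> omega
    · rw [gen_fibs_alt_gen, dif_neg hc]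
      have hlastD : fibs.getLastD 0 = b := by
        rw [List.getLastD_eq_getLast?, hlast]; rfl
      exact ⟨⟨[], by simp⟩, fun x hx => (hmem x hx).1, hpw,
        by rw [hlastD], by rw [hlastD]; omega⟩

-- B's binary search over a list whose digit counts are monotone finds the first index whose
-- digit count reaches the target.
lemma bsearch_eq_findIdx (fibs : List Int) (t : Int) : ∀ (n : Nat) (lo hi : Int),
    (hi - lo).toNat ≤ n → 0 ≤ lo → lo ≤ hi → hi < (fibs.length : Int) →
    (∀ i j : Nat, i ≤ j → j < fibs.length →
      PySem.Str.len (PySem.Int.toStr (fibs.getD i 0))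
        ≤ PySem.Str.len (PySem.Int.toStr (fibs.getD j 0))) →
    (∀ i : Nat, (i : Int) < lo → PySem.Str.len (PySem.Int.toStr (fibs.getD i 0)) < t) →
    (t ≤ PySem.Str.len (PySem.Int.toStr (fibs.getD hi.toNat 0))) →
    gen_fibs_alt_bsearch fibs t lo hi
      = ((fibs.findIdx fun x => decide (t ≤ PySem.Str.len (PySem.Int.toStr x))) : Int) := by
  intro n
  induction n with
  | zero =>
    intro lo hi hn h0 hlohi hhilen hmono hlo hhi
    have heq : hi = lo := by omega
    rw [gen_fibs_alt_bsearch, dif_neg (by omega : ¬ lo < hi)]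
    subst heq
    rw [findIdx_first fibs _ hi.toNat (by omega)
      (by simp only [decide_eq_true_eq]; exact hhi)
      (fun j hj => by
        simp only [decide_eq_true_eq]
        have := hlo j (by omega)
        omega)]
    omega
  | succ n ih =>
    intro lo hi hn h0 hlohi hhilen hmono hlo hhi
    by_cases hlt : lo < hi
    · rw [gen_fibs_alt_bsearch, dif_pos hlt]
      have hm1 : lo ≤ PySem.Int.floordiv (lo + hi) 2 :=
        (PySem.Int.le_floordiv_iff_mul_le (by omega)).mpr (by omega)
      have hm2 : PySem.Int.floordiv (lo + hi) 2 < hi :=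
        (PySem.Int.floordiv_lt_iff_lt_mul (by omega)).mpr (by omega)
      show (if PySem.Str.len (PySem.Int.toStr
            (PySem.List.pyGetD fibs (PySem.Int.floordiv (lo + hi) 2) 0)) < t then
          gen_fibs_alt_bsearch fibs t (PySem.Int.floordiv (lo + hi) 2 + 1) hi
        else
          gen_fibs_alt_bsearch fibs t lo (PySem.Int.floordiv (lo + hi) 2)) = _
      have hmid : PySem.List.pyGetD fibs (PySem.Int.floordiv (lo + hi) 2) 0
          = fibs.getD (PySem.Int.floordiv (lo + hi) 2).toNat 0 := by
        rw [PySem.List.pyGetD_eq_getElem fibs 0 (by omega) (by omega),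
          List.getD_eq_getElem _ _ (by omega)]
      rw [hmid]
      by_cases hcmp : PySem.Str.len
          (PySem.Int.toStr (fibs.getD (PySem.Int.floordiv (lo + hi) 2).toNat 0)) < t
      · rw [if_pos hcmp]
        refine ih (PySem.Int.floordiv (lo + hi) 2 + 1) hi (by omega) (by omega) (by omega)
          hhilen hmono ?_ hhi
        intro i hi'
        have : PySem.Str.len (PySem.Int.toStr (fibs.getD i 0))
            ≤ PySem.Str.len (PySem.Int.toStr (fibs.getD (PySem.Int.floordiv (lo + hi) 2).toNat 0)) :=
          hmono i _ (by omega) (by omega)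
        omega
      · rw [if_neg hcmp]
        exact ih lo (PySem.Int.floordiv (lo + hi) 2) (by omega) h0 (by omega) (by omega)
          hmono hlo (by omega)
    · rw [gen_fibs_alt_bsearch, dif_neg hlt]
      have heq : hi = lo := by omega
      subst heq
      rw [findIdx_first fibs _ hi.toNat (by omega)
        (by simp only [decide_eq_true_eq]; exact hhi)
        (fun j hj => by
          simp only [decide_eq_true_eq]
          have := hlo j (by omega)
          omega)]
      omega

-- The heart of the equivalence: A's fused loop, started at any reachable state, returns the
-- current dict followed by one entry (L, first index of digit length L + 1) for each digit
-- length L from mx+1 up to the digit length of the last generated Fibonacci number — the very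
-- entries B reads off the generated list.
lemma A_loop_items (limit : Int) : ∀ (n : Nat) (fibs : List Int) (a b : Int)
    (inv : 0 < a ∧ a ≤ b) (mx t : Int) (d : PySem.Dict Int Int)
    (hmx : mx = PySem.Str.len (PySem.Int.toStr b))
    (ht : t = (fibs.length : Int))
    (hn : 10 ^ limit.toNat - b.toNat ≤ n)
    (hmem : ∀ x ∈ fibs, 0 < x ∧ x ≤ b)
    (hlast : fibs.getLast? = some b)
    (hpw : fibs.Pairwise (· ≤ ·))
    (hd : ∀ k ∈ d.keys, k ≤ mx),
    (gen_fibs_loop limit fibs a b mx d t (PySem.Str.len (PySem.Int.toStr b))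
        ⟨inv.1, inv.2, rfl⟩).items
    = d.items ++ (PySem.List.pyRange (mx + 1)
        (PySem.Str.len (PySem.Int.toStr
          ((gen_fibs_alt_gen limit fibs a b inv).getLastD 0)) + 1) 1).map
        (fun L => (L, ((gen_fibs_alt_gen limit fibs a b inv).findIdx
            fun x => decide (L ≤ PySem.Str.len (PySem.Int.toStr x)) : Int) + 1)) := by
  intro n
  induction n with
  | zero =>
    intro fibs a b inv mx t d hmx ht hn hmem hlast hpw hd
    have ha := inv.1
    have hab := inv.2
    have hb : 0 < b := by omega
    have hc : ¬ PySem.Str.len (PySem.Int.toStr b) < limit := by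
      intro hlt
      rw [strLen_toStr b hb] at hlt
      have hg := gfDigits_pos b.toNat
      have hchar := (gfDigits_char b.toNat (by omega)).2
      have hpow : 10 ^ gfDigits b.toNat ≤ 10 ^ limit.toNat :=
        Nat.pow_le_pow_right (by norm_num) (by omega)
      omega
    rw [gen_fibs_loop, dif_neg hc, gen_fibs_alt_gen, dif_neg hc]
    have hlastD : fibs.getLastD 0 = b := by
      rw [List.getLastD_eq_getLast?, hlast]; rfl
    rw [hlastD, ← hmx, PySem.List.pyRange_one_eq_nil (by omega)]
    simp
  | succ n ih =>
    intro fibs a b inv mx t d hmx ht hn hmem hlast hpw hd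
    have ha := inv.1
    have hab := inv.2
    have hb : 0 < b := by omega
    by_cases hc : PySem.Str.len (PySem.Int.toStr b) < limit
    · rw [gen_fibs_loop, dif_pos hc, gen_fibs_alt_gen, dif_pos hc]
      have hmem' : ∀ x ∈ fibs ++ [a + b], 0 < x ∧ x ≤ a + b := by
        intro x hx
        rcases List.mem_append.mp hx with hx | hx
        · have := hmem x hx; constructor <;> omega
        · simp at hx; omega
      have hlast' : (fibs ++ [a + b]).getLast? = some (a + b) := by simp
      have hpw' : (fibs ++ [a + b]).Pairwise (· ≤ ·) := by
        refine List.pairwise_append.mpr ⟨hpw, List.pairwise_singleton _ _, ?_⟩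
        intro x hx y hy
        simp at hy
        have := hmem x hx
        omega
      have hn' : 10 ^ limit.toNat - (a + b).toNat ≤ n := by
        have := gf_measure_lt limit a b ha hab hc
        omega
      have ht' : t + 1 = ((fibs ++ [a + b]).length : Int) := by
        rw [ht]
        push_cast [List.length_append, List.length_singleton]
        ring
      rcases step_digits_int a b ha hab with hstep | hstep
      · -- the appended term has the same digit count: A records nothing
        rw [if_neg (by rw [hstep, hmx]; exact lt_irrefl _ :
          ¬ PySem.Str.len (PySem.Int.toStr (a + b)) > mx)]
        exact ih (fibs ++ [a + b]) b (a + b) ⟨by omega, by omega⟩ mx (t + 1) d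
          (hmx.trans hstep.symm) ht' hn' hmem' hlast' hpw' hd
      · -- the digit count steps up by one: A records (new length, new term)
        have hsv : PySem.Str.len (PySem.Int.toStr (a + b)) = mx + 1 := by
          rw [hstep, ← hmx]
        rw [if_pos (by rw [hsv]; exact lt_add_one mx :
          PySem.Str.len (PySem.Int.toStr (a + b)) > mx)]
        have hcont : d.contains (PySem.Str.len (PySem.Int.toStr (a + b))) = false := by
          by_contra hcc
          rw [Bool.not_eq_false] at hcc
          have hk := (PySem.Dict.contains_iff_mem_keys d _).mp hcc
          have hkm := hd _ hk
          rw [hsv] at hkm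
          omega
        have hd' : ∀ k ∈ (d.insert (PySem.Str.len (PySem.Int.toStr (a + b))) (t + 1)).keys,
            k ≤ PySem.Str.len (PySem.Int.toStr (a + b)) := by
          intro k hk
          rw [PySem.Dict.keys_insert_of_not_contains d _ hcont] at hk
          rw [hsv]
          rcases List.mem_append.mp hk with hk | hk
          · have := hd k hk; omega
          · rw [List.mem_singleton] at hk
            rw [hk, hsv]
        rw [ih (fibs ++ [a + b]) b (a + b) ⟨by omega, by omega⟩
          (PySem.Str.len (PySem.Int.toStr (a + b))) (t + 1)
          (d.insert (PySem.Str.len (PySem.Int.toStr (a + b))) (t + 1)) rfl ht' hn'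
          hmem' hlast' hpw' hd']
        rw [PySem.Dict.items_insert_of_not_contains d _ hcont]
        obtain ⟨⟨ext, hext⟩, hpos, hpw2, hle, hlen⟩ :=
          gen_char limit n (fibs ++ [a + b]) b (a + b) ⟨by omega, by omega⟩ hn'
            hmem' hlast' hpw'
        rw [hext] at hle ⊢
        have hvM : mx + 1
            ≤ PySem.Str.len (PySem.Int.toStr ((fibs ++ [a + b] ++ ext).getLastD 0)) := by
          rw [← hsv]
          exact strLen_mono _ _ (by omega) hle
        have hfind : ((fibs ++ [a + b]) ++ ext).findIdx
            (fun x => decide (mx + 1 ≤ PySem.Str.len (PySem.Int.toStr x)))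
            = fibs.length := by
          rw [List.append_assoc, List.findIdx_append]
          have hnone : (fibs.findIdx
              fun x => decide (mx + 1 ≤ PySem.Str.len (PySem.Int.toStr x)))
              = fibs.length := by
            refine List.findIdx_eq_length.mpr (fun x hx => ?_)
            simp only [decide_eq_false_iff_not]
            have h1 := hmem x hx
            have h2 := strLen_mono x b h1.1 h1.2
            rw [← hmx] at h2
            omega
          rw [hnone, if_neg (lt_irrefl _), List.singleton_append, List.findIdx_cons]
          have hpv : (decide (mx + 1 ≤ PySem.Str.len (PySem.Int.toStr (a + b)))) = true := by
            rw [hsv]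
            simp
          rw [hpv]
          simp
        have hcons : PySem.List.pyRange (mx + 1)
            (PySem.Str.len (PySem.Int.toStr ((fibs ++ [a + b] ++ ext).getLastD 0)) + 1) 1
            = (mx + 1) :: PySem.List.pyRange (mx + 1 + 1)
              (PySem.Str.len (PySem.Int.toStr ((fibs ++ [a + b] ++ ext).getLastD 0)) + 1) 1 :=
          PySem.List.pyRange_one_cons (by omega)
        rw [hsv, List.append_assoc, List.singleton_append, hcons, List.map_cons]
        congr 2
        simp only [hfind, ht]
    · rw [gen_fibs_loop, dif_neg hc, gen_fibs_alt_gen, dif_neg hc]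
      have hlastD : fibs.getLastD 0 = b := by
        rw [List.getLastD_eq_getLast?, hlast]; rfl
      rw [hlastD, ← hmx, PySem.List.pyRange_one_eq_nil (by omega)]
      simp

-- ===== VERDICT (by name: the statement is the Claim_ definition above) =====
theorem gen_fibs_spec : Claim_equal_gen_fibs := by
  intro limit _
  unfold Spec_gen_fibs
  have hinv : (0:Int) < 1 ∧ (1:Int) ≤ 1 := ⟨one_pos, le_refl 1⟩
  obtain ⟨⟨ext, hext⟩, hpos, hpw2, hle, hlen⟩ :=
    gen_char limit (10 ^ limit.toNat) [1, 1] 1 1 hinv (Nat.sub_le _ _)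
      (by decide) (by decide) (by decide)
  rw [show PySem.Str.len (PySem.Int.toStr (1 : Int)) = 1 from by decide] at hlen
  have hlength : 2 ≤ (gen_fibs_alt_gen limit [1, 1] 1 1 hinv).length := by
    rw [hext]
    simp
  have hmono : ∀ i j : Nat, i ≤ j → j < (gen_fibs_alt_gen limit [1, 1] 1 1 hinv).length →
      PySem.Str.len (PySem.Int.toStr ((gen_fibs_alt_gen limit [1, 1] 1 1 hinv).getD i 0))
        ≤ PySem.Str.len (PySem.Int.toStr ((gen_fibs_alt_gen limit [1, 1] 1 1 hinv).getD j 0)) := by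
    intro i j hij hj
    rcases Nat.eq_or_lt_of_le hij with rfl | hlt
    · exact le_refl _
    · rw [List.getD_eq_getElem _ 0 (by omega), List.getD_eq_getElem _ 0 hj]
      exact strLen_mono _ _ (hpos _ (List.getElem_mem (by omega)))
        (List.pairwise_iff_getElem.mp hpw2 i j (by omega) hj hlt)
  have hlastD : (gen_fibs_alt_gen limit [1, 1] 1 1 hinv).getLastD 0
      = (gen_fibs_alt_gen limit [1, 1] 1 1 hinv).getD
          ((gen_fibs_alt_gen limit [1, 1] 1 1 hinv).length - 1) 0 := by
    rw [List.getLastD_eq_getLast?, List.getLast?_eq_getElem?, List.getD_eq_getElem?_getD]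
  have hA := A_loop_items limit (10 ^ limit.toNat) [1, 1] 1 1 hinv 1 2
    (PySem.Dict.ofList [(1, 1)]) (by decide) (by decide) (Nat.sub_le _ _)
    (by decide) (by decide) (by decide) (by decide)
  have hM1 : 1 ≤ PySem.Str.len (PySem.Int.toStr
      ((gen_fibs_alt_gen limit [1, 1] 1 1 hinv).getLastD 0)) := by
    rw [hlen]
    exact le_max_right _ _
  have hchars : (PySem.Int.toChars (1 : Int)).length = 1 := by decide
  calc gen_fibs limit
      = (gen_fibs_loop limit [1, 1] 1 1 1 (PySem.Dict.ofList [(1, 1)]) 2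
          (PySem.Str.len (PySem.Int.toStr (1 : Int))) ⟨hinv.1, hinv.2, rfl⟩).items := rfl
    _ = (PySem.Dict.ofList [(1, 1)]).items
          ++ (PySem.List.pyRange (1 + 1) (PySem.Str.len (PySem.Int.toStr
                ((gen_fibs_alt_gen limit [1, 1] 1 1 hinv).getLastD 0)) + 1) 1).map
              (fun L => (L, ((gen_fibs_alt_gen limit [1, 1] 1 1 hinv).findIdx
                  fun x => decide (L ≤ PySem.Str.len (PySem.Int.toStr x)) : Int) + 1)) := hA
    _ = (PySem.List.pyRange 1 (PySem.Str.len (PySem.Int.toStr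
            ((gen_fibs_alt_gen limit [1, 1] 1 1 hinv).getLastD 0)) + 1) 1).map
          (fun L => (L, ((gen_fibs_alt_gen limit [1, 1] 1 1 hinv).findIdx
              fun x => decide (L ≤ PySem.Str.len (PySem.Int.toStr x)) : Int) + 1)) := by
        rw [PySem.List.pyRange_one_cons (a := 1) (by omega), List.map_cons,
          show (PySem.Dict.ofList [((1:Int), (1:Int))]).items = [(1, 1)] from rfl,
          List.singleton_append]
        congr 1
        have hfi : (gen_fibs_alt_gen limit [1, 1] 1 1 hinv).findIdx
            (fun x => decide (1 ≤ PySem.Str.len (PySem.Int.toStr x))) = 0 := by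
          rw [hext]
          simp [List.findIdx_cons, PySem.Str.len_eq, PySem.Int.toList_toStr, hchars]
        show ((1:Int), (1:Int)) = (1, ((gen_fibs_alt_gen limit [1, 1] 1 1 hinv).findIdx
            (fun x => decide ((1:Int) ≤ PySem.Str.len (PySem.Int.toStr x))) : Int) + 1)
        rw [hfi]
        norm_num
    _ = (PySem.List.pyRange 1 (max limit 1 + 1) 1).map
          (fun L => (L, ((gen_fibs_alt_gen limit [1, 1] 1 1 hinv).findIdx
              fun x => decide (L ≤ PySem.Str.len (PySem.Int.toStr x)) : Int) + 1)) := by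
        rw [hlen]
    _ = (PySem.List.pyRange 1 (max limit 1 + 1) 1).map
          (fun L => (L, gen_fibs_alt_bsearch (gen_fibs_alt_gen limit [1, 1] 1 1 hinv) L 0
              (PySem.List.len (gen_fibs_alt_gen limit [1, 1] 1 1 hinv) - 1) + 1)) := by
        refine List.map_congr_left (fun L hL => ?_)
        rw [PySem.List.mem_pyRange_one] at hL
        obtain ⟨hL1, hL2⟩ := hL
        have hLM : L ≤ max limit 1 := by omega
        have hbs := bsearch_eq_findIdx (gen_fibs_alt_gen limit [1, 1] 1 1 hinv) L
          (gen_fibs_alt_gen limit [1, 1] 1 1 hinv).length 0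
          (PySem.List.len (gen_fibs_alt_gen limit [1, 1] 1 1 hinv) - 1)
          (by rw [PySem.List.len_eq]; omega) (le_refl 0)
          (by rw [PySem.List.len_eq]; omega)
          (by rw [PySem.List.len_eq]; omega)
          hmono
          (fun i hi => absurd hi (by omega))
          (by
            have htn : (PySem.List.len (gen_fibs_alt_gen limit [1, 1] 1 1 hinv) - 1).toNat
                = (gen_fibs_alt_gen limit [1, 1] 1 1 hinv).length - 1 := by
              rw [PySem.List.len_eq]
              omega
            rw [htn, ← hlastD, hlen]
            exact hLM)
        rw [hbs]
    _ = gen_fibs_alt limit := by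
        rw [gen_fibs_alt]
        rw [PySem.Dict.items_foldl_insert_fresh _ (fun L => L) _ PySem.Dict.empty
          (fun a _ => rfl)
          (by
            have := PySem.List.nodup_pyRange_one (a := 1) (b := max limit 1 + 1)
            simpa using this)]
        rfl
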